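-- pv_equiv track=rewrite | github.com/sanjayguptakinto/sanjay-cicd-sanbox | src/har_analyzer/utils/helpers.py | categorize_resource_type
-- ===== SOURCE A (Python) =====
-- def categorize_resource_type(mime_type: str, url: str) -> str:
--     """Categorize resource type based on MIME type and URL.
--
--     Args:
--         mime_type: MIME type from response
--         url: Resource URL
--
--     Returns:
--         Resource category (JS, CSS, Image, etc.)
--     """
--     mime_type = mime_type.lower()
--     url = url.lower()
--
--     if "javascript" in mime_type or url.endswith(".js"):
--         return "JS"
--     elif "css" in mime_type or url.endswith(".css"):
--         return "CSS"
--     elif "image" in mime_type or any(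
--         url.endswith(ext) for ext in [".jpg", ".jpeg", ".png", ".gif", ".webp", ".svg"]
--     ):
--         return "Image"
--     elif "html" in mime_type or url.endswith(".html"):
--         return "HTML"
--     elif "font" in mime_type or any(
--         url.endswith(ext) for ext in [".woff", ".woff2", ".ttf", ".otf"]
--     ):
--         return "Font"
--     elif "json" in mime_type or "api" in url:
--         return "API"
--     elif "video" in mime_type:
--         return "Video"
--     elif "audio" in mime_type:
--         return "Audio"
--     else:
--         return "Other"
-- ===== SOURCE B (Python) =====
-- _MIME_KEYWORDS = ["javascript", "css", "image", "html", "font", "json", "video", "audio"]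
-- _EXT_PRIORITY = {"js": 0, "css": 1, "jpg": 2, "jpeg": 2, "png": 2, "gif": 2,
--                  "webp": 2, "svg": 2, "html": 3, "woff": 4, "woff2": 4, "ttf": 4, "otf": 4}
-- _CATEGORIES = ["JS", "CSS", "Image", "HTML", "Font", "API", "Video", "Audio"]
--
--
-- def _extension(u):
--     """Characters after the last '.' of u, or None if u contains no dot."""
--     chars = []
--     for c in reversed(u):
--         if c == ".":
--             chars.reverse()
--             return "".join(chars)
--         chars.append(c)
--     return None
--
--
-- def categorize_resource_type(mime_type: str, url: str) -> str:
--     m = mime_type.lower()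
--     u = url.lower()
--     best = 9
--     for i, kw in enumerate(_MIME_KEYWORDS):
--         if kw in m:
--             best = i
--             break
--     ext = _extension(u)
--     if ext is not None:
--         best = min(best, _EXT_PRIORITY.get(ext, 9))
--     if "api" in u:
--         best = min(best, 5)
--     return _CATEGORIES[best] if best < 8 else "Other"
-- ===== Notes on version B (the rewrite author's own statement) =====
-- stated objective: alternative
-- what changed: Instead of a 9-branch if/elif cascade of substring and endswith tests, B ranks the two inputs independently: it extracts the url's extension (text after the last dot) once and looks its priority up in a dictionary, scans the MIME keyword list for the first-matching keyword's rank, adds an 'api'-substring rank, and maps the minimum rank through a category table.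
import Mathlib
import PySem

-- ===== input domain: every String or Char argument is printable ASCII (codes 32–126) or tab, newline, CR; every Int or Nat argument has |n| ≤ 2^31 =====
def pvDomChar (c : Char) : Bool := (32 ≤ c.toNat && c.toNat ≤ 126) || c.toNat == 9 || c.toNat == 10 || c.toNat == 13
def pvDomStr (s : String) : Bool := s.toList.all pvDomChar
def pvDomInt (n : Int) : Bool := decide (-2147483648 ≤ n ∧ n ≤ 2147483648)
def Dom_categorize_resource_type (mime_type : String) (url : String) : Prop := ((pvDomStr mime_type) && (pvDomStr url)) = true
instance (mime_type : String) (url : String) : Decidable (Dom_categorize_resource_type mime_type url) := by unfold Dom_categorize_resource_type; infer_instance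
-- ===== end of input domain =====

-- B replaces A's if/elif cascade by ranking: a priority index from the MIME keyword list, a priority from a
-- url-extension dictionary (extension = characters after the last dot) plus an 'api' substring rank, combined
-- with min and mapped through a category table (objective: alternative).


-- ===== PORT A =====
def categorize_resource_type (mime_type : String) (url : String) : String :=
  let m := PySem.Str.lower mime_type
  let u := PySem.Str.lower url
  if PySem.Str.isIn "javascript" m || PySem.Str.endswith u ".js" then "JS"
  else if PySem.Str.isIn "css" m || PySem.Str.endswith u ".css" then "CSS"
  else if PySem.Str.isIn "image" m ||
      ([".jpg", ".jpeg", ".png", ".gif", ".webp", ".svg"].any (fun ext => PySem.Str.endswith u ext)) then "Image"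
  else if PySem.Str.isIn "html" m || PySem.Str.endswith u ".html" then "HTML"
  else if PySem.Str.isIn "font" m ||
      ([".woff", ".woff2", ".ttf", ".otf"].any (fun ext => PySem.Str.endswith u ext)) then "Font"
  else if PySem.Str.isIn "json" m || PySem.Str.isIn "api" u then "API"
  else if PySem.Str.isIn "video" m then "Video"
  else if PySem.Str.isIn "audio" m then "Audio"
  else "Other"

-- ===== PORT B =====  (transliteration of Source B; Python strings are ported as their character lists)
def pvMimeKeywords : List (List Char) :=
  ["javascript".toList, "css".toList, "image".toList, "html".toList,
   "font".toList, "json".toList, "video".toList, "audio".toList]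

def pvExtPriority : PySem.Dict (List Char) Nat :=
  PySem.Dict.ofList
    [("js".toList, 0), ("css".toList, 1), ("jpg".toList, 2), ("jpeg".toList, 2), ("png".toList, 2),
     ("gif".toList, 2), ("webp".toList, 2), ("svg".toList, 2), ("html".toList, 3), ("woff".toList, 4),
     ("woff2".toList, 4), ("ttf".toList, 4), ("otf".toList, 4)]

def pvCategories : List String := ["JS", "CSS", "Image", "HTML", "Font", "API", "Video", "Audio"]

-- Source B's `for i, kw in enumerate(_MIME_KEYWORDS): if kw in m: best = i; break`
def pvScanKw (m : List Char) : List (List Char) → Nat → Nat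
  | [], _ => 9
  | kw :: rest, i => if PySem.Chars.isIn kw m then i else pvScanKw m rest (i + 1)

-- Source B's _extension: scan the reversed url, collecting chars until the first '.', then reverse
def pvExtRev : List Char → List Char → Option (List Char)
  | [], _ => none
  | c :: rest, acc => if c = '.' then some acc.reverse else pvExtRev rest (acc ++ [c])

def categorize_resource_type_alt (mime_type : String) (url : String) : String :=
  let m := PySem.Chars.lower mime_type.toList
  let u := PySem.Chars.lower url.toList
  let best0 := pvScanKw m pvMimeKeywords 0
  let best1 := match pvExtRev u.reverse [] with
    | none => best0
    | some e => min best0 (PySem.Dict.getD pvExtPriority e 9)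
  let best2 := if PySem.Chars.isIn "api".toList u then min best1 5 else best1
  if best2 < 8 then pvCategories.getD best2 "Other" else "Other"

-- ===== PRECONDITION & SPEC =====
def Spec_categorize_resource_type (mime_type : String) (url : String) (out : String) : Prop := out = categorize_resource_type_alt mime_type url
instance (mime_type : String) (url : String) (out : String) : Decidable (Spec_categorize_resource_type mime_type url out) := by unfold Spec_categorize_resource_type; infer_instance

-- ===== CLAIM (what is proved, stated in full; the proofs are below) =====
def Claim_equal_categorize_resource_type : Prop := ∀ (mime_type : String) (url : String), Dom_categorize_resource_type mime_type url → Spec_categorize_resource_type mime_type url (categorize_resource_type mime_type url)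

-- ===== LEMMAS AND PROOFS =====

lemma pvExtRev_eq (r : List Char) : ∀ acc, pvExtRev r acc =
    if '.' ∈ r then some ((acc ++ r.takeWhile (fun x => decide (x ≠ '.'))).reverse) else none := by
  induction r with
  | nil => intro acc; simp [pvExtRev]
  | cons c rest ih =>
    intro acc
    by_cases hc : c = '.'
    · subst hc; simp [pvExtRev]
    · rw [pvExtRev, if_neg hc, ih, List.takeWhile_cons]
      by_cases hm : '.' ∈ rest
      · rw [if_pos hm, if_pos (by simp [List.mem_cons, hm]), if_pos (by simp [hc])]
        simp
      · rw [if_neg hm, if_neg (show ¬'.' ∈ c :: rest by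
          simp only [List.mem_cons, hm, or_false]
          exact fun h => hc h.symm)]

lemma prefix_dot_iff (p : List Char) (hp : '.' ∉ p) : ∀ r : List Char,
    ((p ++ ['.']) <+: r) ↔ ('.' ∈ r ∧ r.takeWhile (fun x => decide (x ≠ '.')) = p) := by
  induction p with
  | nil =>
    intro r
    cases r with
    | nil => simp
    | cons c rest =>
      by_cases hc : c = '.'
      · subst hc; simp
      · simp only [List.nil_append, List.cons_prefix_cons, List.takeWhile_cons, List.mem_cons]
        constructor
        · rintro ⟨rfl, -⟩; exact absurd rfl hc
        · rintro ⟨h1, h2⟩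
          rw [if_pos (by simp [hc])] at h2
          exact absurd h2 (by simp)
  | cons q p' ih =>
    intro r
    have hq : q ≠ '.' := by intro h; exact hp (h ▸ List.mem_cons_self ..)
    have hp' : '.' ∉ p' := fun h => hp (List.mem_cons_of_mem _ h)
    cases r with
    | nil => simp
    | cons c rest =>
      rw [List.cons_append, List.cons_prefix_cons, List.takeWhile_cons]
      constructor
      · rintro ⟨rfl, h⟩
        have h2 := (ih hp' rest).mp h
        refine ⟨List.mem_cons_of_mem _ h2.1, ?_⟩
        rw [if_pos (by simp [hq]), h2.2]
      · rintro ⟨h1, h2⟩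
        by_cases hc : c = '.'
        · rw [if_neg (by simp [hc])] at h2; exact absurd h2 (by simp)
        · rw [if_pos (by simp [hc])] at h2
          cases h2
          have hm : '.' ∈ rest := by
            rcases List.mem_cons.mp h1 with h | h
            · exact absurd h.symm hc
            · exact h
          exact ⟨rfl, (ih hp' rest).mpr ⟨hm, rfl⟩⟩

lemma pvEnds_some (u e x : List Char) (h : pvExtRev u.reverse [] = some e) (hx : '.' ∉ x) :
    PySem.Chars.endswith u ('.' :: x) = (x == e) := by
  rw [pvExtRev_eq] at h
  have hx' : '.' ∉ x.reverse := by simpa using hx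
  split at h
  case isTrue hm =>
    rw [List.nil_append] at h
    injection h with he
    have key : PySem.Chars.endswith u ('.' :: x) = true ↔ x = e := by
      rw [PySem.Chars.endswith_iff, ← List.reverse_prefix, List.reverse_cons,
        prefix_dot_iff x.reverse hx' u.reverse]
      constructor
      · rintro ⟨-, h2⟩; rw [← he, h2, List.reverse_reverse]
      · rintro rfl; exact ⟨hm, by rw [← he, List.reverse_reverse]⟩
    by_cases hxe : x = e
    · subst hxe; simp [key.mpr rfl]
    · have h2 : PySem.Chars.endswith u ('.'::x) = false :=
        Bool.eq_false_iff.mpr (fun hh => hxe (key.mp hh))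
      simp [h2, hxe]
  case isFalse => cases h

lemma pvEnds_none (u x : List Char) (h : pvExtRev u.reverse [] = none) (_hx : '.' ∉ x) :
    PySem.Chars.endswith u ('.' :: x) = false := by
  rw [pvExtRev_eq] at h
  split at h
  case isTrue => cases h
  case isFalse hm =>
    rw [Bool.eq_false_iff]
    intro hh
    have hs := (PySem.Chars.endswith_iff u ('.'::x)).mp hh
    exact hm (by simpa using List.mem_reverse.mpr (hs.subset (List.mem_cons_self ..)))

theorem pv_main (ms us : String) :
    categorize_resource_type ms us = categorize_resource_type_alt ms us := by
  unfold categorize_resource_type categorize_resource_type_alt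
  simp only [List.any_cons, List.any_nil, Bool.or_false, PySem.Str.endswith_eq,
    PySem.Str.isIn_eq, PySem.Str.toList_lower]
  set m := PySem.Chars.lower ms.toList with hmdef
  set u := PySem.Chars.lower us.toList with hudef
  simp only [pvScanKw, pvMimeKeywords]
  rw [show (".js" : String).toList = '.' :: ['j', 's'] from rfl, show (".css" : String).toList = '.' :: ['c', 's', 's'] from rfl, show (".jpg" : String).toList = '.' :: ['j', 'p', 'g'] from rfl, show (".jpeg" : String).toList = '.' :: ['j', 'p', 'e', 'g'] from rfl, show (".png" : String).toList = '.' :: ['p', 'n', 'g'] from rfl, show (".gif" : String).toList = '.' :: ['g', 'i', 'f'] from rfl, show (".webp" : String).toList = '.' :: ['w', 'e', 'b', 'p'] from rfl, show (".svg" : String).toList = '.' :: ['s', 'v', 'g'] from rfl, show (".html" : String).toList = '.' :: ['h', 't', 'm', 'l'] from rfl, show (".woff" : String).toList = '.' :: ['w', 'o', 'f', 'f'] from rfl, show (".woff2" : String).toList = '.' :: ['w', 'o', 'f', 'f', '2'] from rfl, show (".ttf" : String).toList = '.' :: ['t', 't', 'f'] from rfl, show (".otf" : String).toList = '.' :: ['o',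 't', 'f'] from rfl]
  cases hext : pvExtRev u.reverse [] with
  | none =>
    have E := fun x hx => pvEnds_none u x hext hx
    rw [E ['j', 's'] (by decide), E ['c', 's', 's'] (by decide), E ['j', 'p', 'g'] (by decide), E ['j', 'p', 'e', 'g'] (by decide), E ['p', 'n', 'g'] (by decide), E ['g', 'i', 'f'] (by decide), E ['w', 'e', 'b', 'p'] (by decide), E ['s', 'v', 'g'] (by decide), E ['h', 't', 'm', 'l'] (by decide), E ['w', 'o', 'f', 'f'] (by decide), E ['w', 'o', 'f', 'f', '2'] (by decide), E ['t', 't', 'f'] (by decide), E ['o', 't', 'f'] (by decide)]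
    generalize PySem.Chars.isIn "javascript".toList m = a0
    generalize PySem.Chars.isIn "css".toList m = a1
    generalize PySem.Chars.isIn "image".toList m = a2
    generalize PySem.Chars.isIn "html".toList m = a3
    generalize PySem.Chars.isIn "font".toList m = a4
    generalize PySem.Chars.isIn "json".toList m = a5
    generalize PySem.Chars.isIn "video".toList m = a6
    generalize PySem.Chars.isIn "audio".toList m = a7
    generalize PySem.Chars.isIn "api".toList u = a8
    revert a0 a1 a2 a3 a4 a5 a6 a7 a8
    decide
  | some e =>
    have E := fun x hx => pvEnds_some u e x hext hx
    rw [E ['j', 's'] (by decide), E ['c', 's', 's'] (by decide), E ['j', 'p', 'g'] (by decide), E ['j', 'p', 'e', 'g'] (by decide), E ['p', 'n', 'g'] (by decide), E ['g', 'i', 'f'] (by decide), E ['w', 'e', 'b', 'p'] (by decide), E ['s', 'v', 'g'] (by decide), E ['h', 't', 'm', 'l'] (by decide), E ['w', 'o', 'f', 'f'] (by decide), E ['w', 'o', 'f', 'f', '2'] (by decide), E ['t', 't', 'f'] (by decide), E ['o', 't', 'f'] (by decide)]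
    by_cases h0 : e = "js".toList
    · subst h0
      generalize PySem.Chars.isIn "javascript".toList m = a0
      generalize PySem.Chars.isIn "css".toList m = a1
      generalize PySem.Chars.isIn "image".toList m = a2
      generalize PySem.Chars.isIn "html".toList m = a3
      generalize PySem.Chars.isIn "font".toList m = a4
      generalize PySem.Chars.isIn "json".toList m = a5
      generalize PySem.Chars.isIn "video".toList m = a6
      generalize PySem.Chars.isIn "audio".toList m = a7
      generalize PySem.Chars.isIn "api".toList u = a8
      revert a0 a1 a2 a3 a4 a5 a6 a7 a8
      decide
    by_cases h1 : e = "css".toList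
    · subst h1
      generalize PySem.Chars.isIn "javascript".toList m = a0
      generalize PySem.Chars.isIn "css".toList m = a1
      generalize PySem.Chars.isIn "image".toList m = a2
      generalize PySem.Chars.isIn "html".toList m = a3
      generalize PySem.Chars.isIn "font".toList m = a4
      generalize PySem.Chars.isIn "json".toList m = a5
      generalize PySem.Chars.isIn "video".toList m = a6
      generalize PySem.Chars.isIn "audio".toList m = a7
      generalize PySem.Chars.isIn "api".toList u = a8
      revert a0 a1 a2 a3 a4 a5 a6 a7 a8
      decide
    by_cases h2 : e = "jpg".toList
    · subst h2
      generalize PySem.Chars.isIn "javascript".toList m = a0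
      generalize PySem.Chars.isIn "css".toList m = a1
      generalize PySem.Chars.isIn "image".toList m = a2
      generalize PySem.Chars.isIn "html".toList m = a3
      generalize PySem.Chars.isIn "font".toList m = a4
      generalize PySem.Chars.isIn "json".toList m = a5
      generalize PySem.Chars.isIn "video".toList m = a6
      generalize PySem.Chars.isIn "audio".toList m = a7
      generalize PySem.Chars.isIn "api".toList u = a8
      revert a0 a1 a2 a3 a4 a5 a6 a7 a8
      decide
    by_cases h3 : e = "jpeg".toList
    · subst h3
      generalize PySem.Chars.isIn "javascript".toList m = a0
      generalize PySem.Chars.isIn "css".toList m = a1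
      generalize PySem.Chars.isIn "image".toList m = a2
      generalize PySem.Chars.isIn "html".toList m = a3
      generalize PySem.Chars.isIn "font".toList m = a4
      generalize PySem.Chars.isIn "json".toList m = a5
      generalize PySem.Chars.isIn "video".toList m = a6
      generalize PySem.Chars.isIn "audio".toList m = a7
      generalize PySem.Chars.isIn "api".toList u = a8
      revert a0 a1 a2 a3 a4 a5 a6 a7 a8
      decide
    by_cases h4 : e = "png".toList
    · subst h4
      generalize PySem.Chars.isIn "javascript".toList m = a0
      generalize PySem.Chars.isIn "css".toList m = a1
      generalize PySem.Chars.isIn "image".toList m = a2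
      generalize PySem.Chars.isIn "html".toList m = a3
      generalize PySem.Chars.isIn "font".toList m = a4
      generalize PySem.Chars.isIn "json".toList m = a5
      generalize PySem.Chars.isIn "video".toList m = a6
      generalize PySem.Chars.isIn "audio".toList m = a7
      generalize PySem.Chars.isIn "api".toList u = a8
      revert a0 a1 a2 a3 a4 a5 a6 a7 a8
      decide
    by_cases h5 : e = "gif".toList
    · subst h5
      generalize PySem.Chars.isIn "javascript".toList m = a0
      generalize PySem.Chars.isIn "css".toList m = a1
      generalize PySem.Chars.isIn "image".toList m = a2
      generalize PySem.Chars.isIn "html".toList m = a3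
      generalize PySem.Chars.isIn "font".toList m = a4
      generalize PySem.Chars.isIn "json".toList m = a5
      generalize PySem.Chars.isIn "video".toList m = a6
      generalize PySem.Chars.isIn "audio".toList m = a7
      generalize PySem.Chars.isIn "api".toList u = a8
      revert a0 a1 a2 a3 a4 a5 a6 a7 a8
      decide
    by_cases h6 : e = "webp".toList
    · subst h6
      generalize PySem.Chars.isIn "javascript".toList m = a0
      generalize PySem.Chars.isIn "css".toList m = a1
      generalize PySem.Chars.isIn "image".toList m = a2
      generalize PySem.Chars.isIn "html".toList m = a3
      generalize PySem.Chars.isIn "font".toList m = a4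
      generalize PySem.Chars.isIn "json".toList m = a5
      generalize PySem.Chars.isIn "video".toList m = a6
      generalize PySem.Chars.isIn "audio".toList m = a7
      generalize PySem.Chars.isIn "api".toList u = a8
      revert a0 a1 a2 a3 a4 a5 a6 a7 a8
      decide
    by_cases h7 : e = "svg".toList
    · subst h7
      generalize PySem.Chars.isIn "javascript".toList m = a0
      generalize PySem.Chars.isIn "css".toList m = a1
      generalize PySem.Chars.isIn "image".toList m = a2
      generalize PySem.Chars.isIn "html".toList m = a3
      generalize PySem.Chars.isIn "font".toList m = a4
      generalize PySem.Chars.isIn "json".toList m = a5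
      generalize PySem.Chars.isIn "video".toList m = a6
      generalize PySem.Chars.isIn "audio".toList m = a7
      generalize PySem.Chars.isIn "api".toList u = a8
      revert a0 a1 a2 a3 a4 a5 a6 a7 a8
      decide
    by_cases h8 : e = "html".toList
    · subst h8
      generalize PySem.Chars.isIn "javascript".toList m = a0
      generalize PySem.Chars.isIn "css".toList m = a1
      generalize PySem.Chars.isIn "image".toList m = a2
      generalize PySem.Chars.isIn "html".toList m = a3
      generalize PySem.Chars.isIn "font".toList m = a4
      generalize PySem.Chars.isIn "json".toList m = a5
      generalize PySem.Chars.isIn "video".toList m = a6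
      generalize PySem.Chars.isIn "audio".toList m = a7
      generalize PySem.Chars.isIn "api".toList u = a8
      revert a0 a1 a2 a3 a4 a5 a6 a7 a8
      decide
    by_cases h9 : e = "woff".toList
    · subst h9
      generalize PySem.Chars.isIn "javascript".toList m = a0
      generalize PySem.Chars.isIn "css".toList m = a1
      generalize PySem.Chars.isIn "image".toList m = a2
      generalize PySem.Chars.isIn "html".toList m = a3
      generalize PySem.Chars.isIn "font".toList m = a4
      generalize PySem.Chars.isIn "json".toList m = a5
      generalize PySem.Chars.isIn "video".toList m = a6
      generalize PySem.Chars.isIn "audio".toList m = a7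
      generalize PySem.Chars.isIn "api".toList u = a8
      revert a0 a1 a2 a3 a4 a5 a6 a7 a8
      decide
    by_cases h10 : e = "woff2".toList
    · subst h10
      generalize PySem.Chars.isIn "javascript".toList m = a0
      generalize PySem.Chars.isIn "css".toList m = a1
      generalize PySem.Chars.isIn "image".toList m = a2
      generalize PySem.Chars.isIn "html".toList m = a3
      generalize PySem.Chars.isIn "font".toList m = a4
      generalize PySem.Chars.isIn "json".toList m = a5
      generalize PySem.Chars.isIn "video".toList m = a6
      generalize PySem.Chars.isIn "audio".toList m = a7
      generalize PySem.Chars.isIn "api".toList u = a8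
      revert a0 a1 a2 a3 a4 a5 a6 a7 a8
      decide
    by_cases h11 : e = "ttf".toList
    · subst h11
      generalize PySem.Chars.isIn "javascript".toList m = a0
      generalize PySem.Chars.isIn "css".toList m = a1
      generalize PySem.Chars.isIn "image".toList m = a2
      generalize PySem.Chars.isIn "html".toList m = a3
      generalize PySem.Chars.isIn "font".toList m = a4
      generalize PySem.Chars.isIn "json".toList m = a5
      generalize PySem.Chars.isIn "video".toList m = a6
      generalize PySem.Chars.isIn "audio".toList m = a7
      generalize PySem.Chars.isIn "api".toList u = a8
      revert a0 a1 a2 a3 a4 a5 a6 a7 a8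
      decide
    by_cases h12 : e = "otf".toList
    · subst h12
      generalize PySem.Chars.isIn "javascript".toList m = a0
      generalize PySem.Chars.isIn "css".toList m = a1
      generalize PySem.Chars.isIn "image".toList m = a2
      generalize PySem.Chars.isIn "html".toList m = a3
      generalize PySem.Chars.isIn "font".toList m = a4
      generalize PySem.Chars.isIn "json".toList m = a5
      generalize PySem.Chars.isIn "video".toList m = a6
      generalize PySem.Chars.isIn "audio".toList m = a7
      generalize PySem.Chars.isIn "api".toList u = a8
      revert a0 a1 a2 a3 a4 a5 a6 a7 a8
      decide
    have hb0 : (['j', 's'] == e) = false := beq_eq_false_iff_ne.mpr (fun hh => h0 hh.symm)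
    have hb1 : (['c', 's', 's'] == e) = false := beq_eq_false_iff_ne.mpr (fun hh => h1 hh.symm)
    have hb2 : (['j', 'p', 'g'] == e) = false := beq_eq_false_iff_ne.mpr (fun hh => h2 hh.symm)
    have hb3 : (['j', 'p', 'e', 'g'] == e) = false := beq_eq_false_iff_ne.mpr (fun hh => h3 hh.symm)
    have hb4 : (['p', 'n', 'g'] == e) = false := beq_eq_false_iff_ne.mpr (fun hh => h4 hh.symm)
    have hb5 : (['g', 'i', 'f'] == e) = false := beq_eq_false_iff_ne.mpr (fun hh => h5 hh.symm)
    have hb6 : (['w', 'e', 'b', 'p'] == e) = false := beq_eq_false_iff_ne.mpr (fun hh => h6 hh.symm)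
    have hb7 : (['s', 'v', 'g'] == e) = false := beq_eq_false_iff_ne.mpr (fun hh => h7 hh.symm)
    have hb8 : (['h', 't', 'm', 'l'] == e) = false := beq_eq_false_iff_ne.mpr (fun hh => h8 hh.symm)
    have hb9 : (['w', 'o', 'f', 'f'] == e) = false := beq_eq_false_iff_ne.mpr (fun hh => h9 hh.symm)
    have hb10 : (['w', 'o', 'f', 'f', '2'] == e) = false := beq_eq_false_iff_ne.mpr (fun hh => h10 hh.symm)
    have hb11 : (['t', 't', 'f'] == e) = false := beq_eq_false_iff_ne.mpr (fun hh => h11 hh.symm)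
    have hb12 : (['o', 't', 'f'] == e) = false := beq_eq_false_iff_ne.mpr (fun hh => h12 hh.symm)
    have hg : PySem.Dict.getD pvExtPriority e 9 = 9 := by
      have hmk : pvExtPriority = PySem.Dict.mk [(['j', 's'], 0), (['c', 's', 's'], 1), (['j', 'p', 'g'], 2), (['j', 'p', 'e', 'g'], 2), (['p', 'n', 'g'], 2), (['g', 'i', 'f'], 2), (['w', 'e', 'b', 'p'], 2), (['s', 'v', 'g'], 2), (['h', 't', 'm', 'l'], 3), (['w', 'o', 'f', 'f'], 4), (['w', 'o', 'f', 'f', '2'], 4), (['t', 't', 'f'], 4), (['o', 't', 'f'], 4)] := by rfl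
      simp [hmk, PySem.Dict.getD_eq_get?_getD, hb0, hb1, hb2, hb3, hb4, hb5, hb6, hb7, hb8, hb9, hb10, hb11, hb12, PySem.Dict.get?]
    rw [hb0, hb1, hb2, hb3, hb4, hb5, hb6, hb7, hb8, hb9, hb10, hb11, hb12]
    dsimp only
    simp only [hg]
    generalize PySem.Chars.isIn "javascript".toList m = a0
    generalize PySem.Chars.isIn "css".toList m = a1
    generalize PySem.Chars.isIn "image".toList m = a2
    generalize PySem.Chars.isIn "html".toList m = a3
    generalize PySem.Chars.isIn "font".toList m = a4
    generalize PySem.Chars.isIn "json".toList m = a5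
    generalize PySem.Chars.isIn "video".toList m = a6
    generalize PySem.Chars.isIn "audio".toList m = a7
    generalize PySem.Chars.isIn "api".toList u = a8
    revert a0 a1 a2 a3 a4 a5 a6 a7 a8
    decide

-- ===== VERDICT (by name: the statement is the Claim_ definition above) =====
theorem categorize_resource_type_spec : Claim_equal_categorize_resource_type := by
  intro mime_type url _
  unfold Spec_categorize_resource_type
  exact pv_main mime_type url
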